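-- pv_equiv track=rewrite | github.com/oils-for-unix/oils | osh/builtin_pure.py | _ParseOptSpec
-- ===== SOURCE A (Python) =====
-- def _ParseOptSpec(spec_str):
--   # type: (str) -> Dict[str, bool]
--   spec = {}  # type: Dict[str, bool]
--   i = 0
--   n = len(spec_str)
--   while True:
--     if i >= n:
--       break
--     ch = spec_str[i]
--     spec[ch] = False
--     i += 1
--     if i >= n:
--       break
--     # If the next character is :, change the value to True.
--     if spec_str[i] == ':':
--       spec[ch] = True
--       i += 1
--   return spec
-- ===== SOURCE B (Python) =====
-- def _ParseOptSpec(spec_str):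
--   # One pass with a look-back 'last-key' state instead of index lookahead.
--   spec = {}
--   prev = None
--   for ch in spec_str:
--     if ch == ':' and prev is not None:
--       spec[prev] = True
--       prev = None
--     else:
--       spec[ch] = False
--       prev = ch
--   return spec
-- ===== Notes on version B (the rewrite author's own statement) =====
-- stated objective: simpler
-- what changed: Replaced the index-based while loop with lookahead and manual index increments by a single for-loop over the characters keeping a look-back state variable (the last colon-eligible key) that a colon upgrades.
import Mathlib
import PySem

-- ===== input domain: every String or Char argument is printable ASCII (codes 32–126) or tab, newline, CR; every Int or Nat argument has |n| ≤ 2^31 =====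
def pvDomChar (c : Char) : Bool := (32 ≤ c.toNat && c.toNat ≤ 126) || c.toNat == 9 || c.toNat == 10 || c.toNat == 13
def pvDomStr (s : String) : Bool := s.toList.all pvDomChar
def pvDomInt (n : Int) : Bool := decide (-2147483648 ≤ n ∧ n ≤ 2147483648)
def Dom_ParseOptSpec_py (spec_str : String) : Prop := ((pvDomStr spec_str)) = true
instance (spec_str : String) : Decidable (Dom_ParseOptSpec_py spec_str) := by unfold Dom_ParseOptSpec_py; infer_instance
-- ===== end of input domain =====

-- B changes: single forward pass with a look-back 'prev' state instead of an index loop with colon lookahead (simpler decomposition, same cost).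

-- ===== PORT A =====
-- A's while loop over index i with lookahead at i+1; the remaining suffix spec_str[i:]
-- is carried as the list, so 'i >= n' is '[]', 'spec_str[i]' is the head.
def pvLoopA (spec : PySem.Dict String Bool) : List Char → PySem.Dict String Bool
  | [] => spec
  | ch :: rest =>
    let spec := spec.insert (String.ofList [ch]) false
    match rest with
    | [] => spec
    | c2 :: rest2 =>
      if c2 = ':' then pvLoopA (spec.insert (String.ofList [ch]) true) rest2
      else pvLoopA spec (c2 :: rest2)

def ParseOptSpec_py (spec_str : String) : List (String × Bool) :=
  (pvLoopA PySem.Dict.empty spec_str.toList).items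

-- ===== PORT B =====
def pvStepB (st : PySem.Dict String Bool × Option String) (ch : Char) :
    PySem.Dict String Bool × Option String :=
  match st with
  | (spec, prev) =>
    if ch = ':' ∧ prev.isSome then
      (spec.insert (prev.getD "") true, none)
    else
      (spec.insert (String.ofList [ch]) false, some (String.ofList [ch]))

def ParseOptSpec_py_alt (spec_str : String) : List (String × Bool) :=
  (spec_str.toList.foldl pvStepB (PySem.Dict.empty, none)).1.items

-- ===== PRECONDITION & SPEC =====
def Spec_ParseOptSpec_py (spec_str : String) (out : List (String × Bool)) : Prop := out = ParseOptSpec_py_alt spec_str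
instance (spec_str : String) (out : List (String × Bool)) : Decidable (Spec_ParseOptSpec_py spec_str out) := by unfold Spec_ParseOptSpec_py; infer_instance

-- ===== CLAIM (what is proved, stated in full; the proofs are below) =====
def Claim_equal_ParseOptSpec_py : Prop := ∀ (spec_str : String), Dom_ParseOptSpec_py spec_str → Spec_ParseOptSpec_py spec_str (ParseOptSpec_py spec_str)

-- ===== LEMMAS AND PROOFS =====

-- When the head is not ':', B's step ignores prev: the carried prev can be reset.
theorem pvFoldB_prev_irrel (spec : PySem.Dict String Bool) (p : Option String)
    (c : Char) (cs : List Char) (h : c ≠ ':') :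
    (c :: cs).foldl pvStepB (spec, p) = (c :: cs).foldl pvStepB (spec, none) := by
  simp only [List.foldl_cons, pvStepB]
  rw [if_neg (by simp [h]), if_neg (by simp [h])]

theorem pvLoopA_eq_foldB_aux (n : Nat) : ∀ (cs : List Char), cs.length ≤ n →
    ∀ (spec : PySem.Dict String Bool),
    pvLoopA spec cs = (cs.foldl pvStepB (spec, none)).1 := by
  induction n with
  | zero => intro cs h spec; rw [List.length_eq_zero_iff.mp (Nat.le_zero.mp h)]; rfl
  | succ n ih =>
    intro cs hlen spec
    match cs with
    | [] => rfl
    | [ch] =>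
      simp [pvLoopA, pvStepB]
    | ch :: c2 :: rest2 =>
      simp only [pvLoopA, List.foldl_cons]
      rw [show pvStepB (spec, none) ch
            = (spec.insert (String.ofList [ch]) false, some (String.ofList [ch])) from by
          simp [pvStepB]]
      by_cases h : c2 = ':'
      · subst h
        rw [show pvStepB (spec.insert (String.ofList [ch]) false, some (String.ofList [ch])) ':'
              = ((spec.insert (String.ofList [ch]) false).insert (String.ofList [ch]) true, none) from by
            simp [pvStepB, Option.getD]]
        exact ih rest2 (by simp at hlen ⊢; omega) _
      · simp only [if_neg h]
        rw [← List.foldl_cons, pvFoldB_prev_irrel _ _ _ _ h]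
        exact ih (c2 :: rest2) (by simp at hlen ⊢; omega) _

-- ===== VERDICT (by name: the statement is the Claim_ definition above) =====
theorem ParseOptSpec_py_spec : Claim_equal_ParseOptSpec_py := by
  intro s _
  unfold Spec_ParseOptSpec_py ParseOptSpec_py ParseOptSpec_py_alt
  rw [pvLoopA_eq_foldB_aux s.toList.length s.toList le_rfl]
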